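-- pv_equiv track=rewrite | github.com/tejaswi0905/DSA-Python | Code_forces_sparring/Implementation/destroyer.py | solve
-- ===== SOURCE A (Python) =====
-- from collections import defaultdict, deque
--
-- def solve(n, arr):
--     freq = defaultdict(int)
--     for i, ele in enumerate(arr):
--         freq[ele] += 1
--
--     num = freq.get(0, 0)
--     if num == 0:
--         return "NO"
--     i = 1
--     while i <= max(freq.keys()):
--         if i not in freq:
--             return "NO"
--         if num < freq[i]:
--             return "NO"
--         num = freq[i]
--         i += 1
--     return "YES"
-- ===== SOURCE B (Python) =====
-- def solve(n, arr):
--     s = sorted(arr)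
--     zeros = s.count(0)
--     if zeros == 0:
--         return "NO"
--     pos = [x for x in s if x > 0]
--     expected = 1
--     prev = zeros
--     k = 0
--     while k < len(pos):
--         v = pos[k]
--         c = 1
--         while k + c < len(pos) and pos[k + c] == v:
--             c += 1
--         if v != expected or c > prev:
--             return "NO"
--         prev = c
--         expected += 1
--         k += c
--     return "YES"
-- ===== Notes on version B (the rewrite author's own statement) =====
-- stated objective: alternative
-- what changed: Replaces the frequency dict plus a while loop probing every integer key 1..max(arr) with a sort-then-single-grouping-pass: count zeros, then scan the sorted positives grouping runs of equal values against an expected-value counter and the previous run length.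
import Mathlib
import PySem

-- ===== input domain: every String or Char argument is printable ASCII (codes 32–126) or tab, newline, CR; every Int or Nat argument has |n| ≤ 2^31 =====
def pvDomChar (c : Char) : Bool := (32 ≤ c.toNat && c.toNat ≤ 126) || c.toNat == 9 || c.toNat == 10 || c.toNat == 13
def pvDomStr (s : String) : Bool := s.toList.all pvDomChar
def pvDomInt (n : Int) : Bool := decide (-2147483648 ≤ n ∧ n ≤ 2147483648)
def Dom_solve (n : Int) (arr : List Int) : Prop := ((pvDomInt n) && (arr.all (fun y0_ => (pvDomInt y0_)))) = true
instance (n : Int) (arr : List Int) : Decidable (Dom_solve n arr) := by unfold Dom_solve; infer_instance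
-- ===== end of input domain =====

-- B replaces A's dict + probe-every-key-up-to-max loop with a sort-then-single-grouping-pass (alternative decomposition).

-- ===== PORT A =====
-- the while loop 'i = 1; while i <= M: …; i += 1' — fuel M.toNat counts its iterations
def solveLoop (freq : PySem.Dict Int Int) : Int → Int → Nat → String
  | _, _, 0 => "YES"
  | i, num, Nat.succ k =>
    if ¬ freq.contains i then "NO"
    else if num < freq.getD i 0 then "NO"
    else solveLoop freq (i + 1) (freq.getD i 0) k

def solve (n : Int) (arr : List Int) : String :=
  let freq := PySem.Dict.counter arr            -- the defaultdict(int) counting loop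
  let num := freq.getD 0 0
  if num = 0 then "NO"
  else
    match PySem.List.max? freq.keys (fun k => k) with
    | none => "NO"                               -- unreachable: num ≠ 0 means keys ≠ []
    | some M => solveLoop freq 1 num M.toNat

-- ===== PORT B =====
-- the outer while over the positive runs: v = pos[k]; inner while counts the run; then check and advance
def altLoop : List Int → Int → Int → String
  | [], _, _ => "YES"
  | v :: rest, expected, prev =>
    let c : Int := 1 + (rest.takeWhile (fun x => x == v)).length
    if v ≠ expected then "NO"
    else if prev < c then "NO"
    else altLoop (rest.dropWhile (fun x => x == v)) (expected + 1) c
termination_by l => l.length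
decreasing_by
  simpa using Nat.lt_succ_of_le (List.length_dropWhile_le _ _)

def solve_alt (n : Int) (arr : List Int) : String :=
  let s := PySem.List.sorted arr (fun x => x) false
  let zeros : Int := s.count 0
  if zeros = 0 then "NO"
  else altLoop (s.filter (fun x => decide (0 < x))) 1 zeros

-- ===== PRECONDITION & SPEC =====
def Spec_solve (n : Int) (arr : List Int) (out : String) : Prop := out = solve_alt n arr
instance (n : Int) (arr : List Int) (out : String) : Decidable (Spec_solve n arr out) := by unfold Spec_solve; infer_instance

-- ===== CLAIM (what is proved, stated in full; the proofs are below) =====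
def Claim_equal_solve : Prop := ∀ (n : Int) (arr : List Int), Dom_solve n arr → Spec_solve n arr (solve n arr)

-- ===== LEMMAS AND PROOFS =====

-- the common characterisation of "YES": 0 occurs, and every positive i not exceeding
-- some element has positive count and count i ≤ count (i-1)
def Chain (arr : List Int) : Prop :=
  ∀ i : Int, 1 ≤ i → (∃ j ∈ arr, i ≤ j) → (0 < arr.count i ∧ arr.count i ≤ arr.count (i - 1))

theorem solveLoop_mem (freq : PySem.Dict Int Int) (i num : Int) (k : Nat) :
    solveLoop freq i num k = "YES" ∨ solveLoop freq i num k = "NO" := by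
  induction k generalizing i num with
  | zero => left; rfl
  | succ k ih =>
    simp only [solveLoop]
    split_ifs
    all_goals first | exact ih _ _ | (right; rfl)

theorem altLoop_mem (l : List Int) (expected prev : Int) :
    altLoop l expected prev = "YES" ∨ altLoop l expected prev = "NO" := by
  induction l, expected, prev using altLoop.induct with
  | case1 => left; simp [altLoop]
  | case2 v rest expected prev h => right; simp [altLoop, h]
  | case3 v rest expected prev c h1 h2 =>
    right; simp only [altLoop]; rw [if_neg h1, if_pos h2]
  | case4 v rest expected prev c h1 h2 ih =>
    simp only [altLoop]; rw [if_neg h1, if_neg h2]; exact ih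

-- on a sorted list v :: rest, the takeWhile-run after v is all copies of v and everything dropped past it is > v
theorem run_split (v : Int) (rest : List Int) (hs : (v :: rest).Pairwise (· ≤ ·)) :
    (∀ x ∈ rest.takeWhile (fun x => x == v), x = v) ∧
    (∀ x ∈ rest.dropWhile (fun x => x == v), v < x) := by
  have hrest : ∀ x ∈ rest, v ≤ x := (List.pairwise_cons.mp hs).1
  refine ⟨fun x hx => by simpa using List.mem_takeWhile_imp hx, ?_⟩
  have hdp : (rest.dropWhile (fun x => x == v)).Pairwise (· ≤ ·) :=
    List.Pairwise.sublist (List.dropWhile_sublist _) ((List.pairwise_cons.mp hs).2)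
  rcases hd0 : rest.dropWhile (fun x => x == v) with _ | ⟨h, tl⟩
  · simp
  · have hne : (h == v) = false := by
      have := List.head_dropWhile_not (fun x => x == v) (l := rest) (by rw [hd0]; simp)
      simpa [hd0] using this
    have hhv : v < h := by
      have hmem : h ∈ rest := (List.dropWhile_sublist _).mem (by rw [hd0]; exact List.mem_cons_self)
      have := hrest h hmem
      simp at hne; omega
    intro x hx
    rcases List.mem_cons.mp hx with rfl | hx'
    · exact hhv
    · have : h ≤ x := by
        rw [hd0] at hdp
        exact (List.pairwise_cons.mp hdp).1 x hx'
      omega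

-- counts across the run decomposition l = v :: t ++ d
theorem run_counts (v : Int) (rest : List Int) (hs : (v :: rest).Pairwise (· ≤ ·)) :
    ((v :: rest).count v = 1 + (rest.takeWhile (fun x => x == v)).length) ∧
    (∀ w : Int, w ≠ v → (v :: rest).count w = (rest.dropWhile (fun x => x == v)).count w) := by
  obtain ⟨ht, hd⟩ := run_split v rest hs
  have hsplit : rest.takeWhile (fun x => x == v) ++ rest.dropWhile (fun x => x == v) = rest :=
    List.takeWhile_append_dropWhile
  constructor
  · have htc : (rest.takeWhile (fun x => x == v)).count v = (rest.takeWhile (fun x => x == v)).length :=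
      List.count_eq_length.mpr (fun b hb => (ht b hb).symm)
    have hdc : (rest.dropWhile (fun x => x == v)).count v = 0 :=
      List.count_eq_zero.mpr (fun hmem => lt_irrefl v (hd v hmem))
    have : rest.count v = (rest.takeWhile (fun x => x == v)).count v + (rest.dropWhile (fun x => x == v)).count v := by
      rw [← List.count_append, hsplit]
    simp [this, htc, hdc]
    omega
  · intro w hw
    have htc : (rest.takeWhile (fun x => x == v)).count w = 0 :=
      List.count_eq_zero.mpr (fun hmem => hw (ht w hmem))
    have heq : rest.count w = (rest.takeWhile (fun x => x == v)).count w + (rest.dropWhile (fun x => x == v)).count w := by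
      rw [← List.count_append, hsplit]
    have hvw : (w == v) = false := by simp [hw]
    simp [List.count_cons, heq, htc]
    exact fun h => hw h.symm

theorem altLoop_iff : ∀ (l : List Int) (expected prev : Int),
    l.Pairwise (· ≤ ·) → (∀ x ∈ l, expected ≤ x) →
    (altLoop l expected prev = "YES" ↔
      ∀ i : Int, expected ≤ i → (∃ j ∈ l, i ≤ j) →
        (0 < l.count i ∧ (l.count i : Int) ≤ (if i = expected then prev else (l.count (i - 1) : Int)))) := by
  intro l expected prev
  induction l, expected, prev using altLoop.induct with
  | case1 x1 x2 =>
    intro _ _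
    simp [altLoop]
  | case2 v rest expected prev h =>
    intro hs hlb
    simp only [altLoop]; rw [if_pos h]
    have hvlt : expected < v := lt_of_le_of_ne (hlb v List.mem_cons_self) (Ne.symm h)
    have hrest : ∀ x ∈ rest, v ≤ x := (List.pairwise_cons.mp hs).1
    have hnot : expected ∉ (v :: rest) := by
      intro hmem
      rcases List.mem_cons.mp hmem with heq | hmem'
      · omega
      · have := hrest _ hmem'; omega
    constructor
    · intro hbad; exact absurd hbad (by decide)
    · intro hr
      have := (hr expected le_rfl ⟨v, List.mem_cons_self, le_of_lt hvlt⟩).1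
      rw [List.count_eq_zero.mpr hnot] at this
      exact absurd this (lt_irrefl 0)
  | case3 v rest expected prev c h1 h2 =>
    intro hs hlb
    have hv : v = expected := not_not.mp (by simpa using h1)
    subst hv
    simp only [altLoop]; rw [if_neg h1, if_pos h2]
    obtain ⟨hc1, _⟩ := run_counts v rest hs
    constructor
    · intro hbad; exact absurd hbad (by decide)
    · intro hr
      have := (hr v le_rfl ⟨v, List.mem_cons_self, le_rfl⟩).2
      rw [if_pos rfl, hc1] at this
      push_cast at this h2
      omega
  | case4 v rest expected prev c h1 h2 ih =>
    intro hs hlb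
    have hv : v = expected := not_not.mp (by simpa using h1)
    subst hv
    simp only [altLoop]; rw [if_neg h1, if_neg h2]
    obtain ⟨ht, hd⟩ := run_split v rest hs
    obtain ⟨hc1, hc2⟩ := run_counts v rest hs
    have hdp : (rest.dropWhile (fun x => x == v)).Pairwise (· ≤ ·) :=
      List.Pairwise.sublist (List.dropWhile_sublist _) ((List.pairwise_cons.mp hs).2)
    have hdlb : ∀ x ∈ rest.dropWhile (fun x => x == v), v + 1 ≤ x := fun x hx => hd x hx
    rw [ih hdp hdlb]
    -- membership transfer: for i ≥ v+1, witnesses above i are the same in l and in the dropped tail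
    have hex : ∀ i : Int, v + 1 ≤ i →
        ((∃ j ∈ (v :: rest), i ≤ j) ↔ (∃ j ∈ rest.dropWhile (fun x => x == v), i ≤ j)) := by
      intro i hi
      constructor
      · rintro ⟨j, hj, hij⟩
        rcases List.mem_cons.mp hj with rfl | hj'
        · omega
        · rw [← List.takeWhile_append_dropWhile (p := fun x => x == v) (l := rest)] at hj'
          rcases List.mem_append.mp hj' with hj'' | hj''
          · have := ht j hj''; omega
          · exact ⟨j, hj'', hij⟩
      · rintro ⟨j, hj, hij⟩
        exact ⟨j, List.mem_cons_of_mem _ ((List.dropWhile_sublist _).mem hj), hij⟩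
    have hcv : ((v :: rest).count v : Int) = c := by rw [hc1]; push_cast; ring
    constructor
    · -- RHS_d → RHS_l
      intro h i hi hexl
      by_cases hie : i = v
      · subst hie
        refine ⟨by rw [hc1]; omega, ?_⟩
        rw [if_pos rfl, hcv]; omega
      · have hi1 : v + 1 ≤ i := by omega
        obtain ⟨hpos, hbound⟩ := h i hi1 ((hex i hi1).mp hexl)
        have hci : (v :: rest).count i = (rest.dropWhile (fun x => x == v)).count i := hc2 i hie
        refine ⟨by rw [hci]; exact hpos, ?_⟩
        rw [if_neg hie, hci]
        by_cases hi2 : i = v + 1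
        · rw [if_pos (by omega)] at hbound
          have : ((v :: rest).count (i - 1) : Int) = c := by
            rw [show i - 1 = v by omega]; exact hcv
          rw [this]; exact hbound
        · rw [if_neg (by omega)] at hbound
          rw [hc2 (i - 1) (by omega)]
          exact hbound
    · -- RHS_l → RHS_d
      intro h i hi1 hexd
      have hie : i ≠ v := by omega
      obtain ⟨hpos, hbound⟩ := h i (by omega) ((hex i hi1).mpr hexd)
      rw [if_neg hie] at hbound
      have hci : (v :: rest).count i = (rest.dropWhile (fun x => x == v)).count i := hc2 i hie
      refine ⟨by rw [← hci]; exact hpos, ?_⟩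
      by_cases hi2 : i = v + 1
      · rw [if_pos (by omega)]
        have : ((v :: rest).count (i - 1) : Int) = c := by
          rw [show i - 1 = v by omega]; exact hcv
        rw [this] at hbound
        rw [← hci]; exact hbound
      · rw [if_neg (by omega), ← hci, ← hc2 (i - 1) (by omega)]
        exact hbound

theorem solveLoop_iff (arr : List Int) (M : Int) (k : Nat) (i num : Int)
    (hnum : num = (arr.count (i - 1) : Int)) (hk : i + (k : Int) = M + 1) :
    (solveLoop (PySem.Dict.counter arr) i num k = "YES" ↔
      ∀ j : Int, i ≤ j → j ≤ M → (0 < arr.count j ∧ arr.count j ≤ arr.count (j - 1))) := by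
  induction k generalizing i num with
  | zero =>
    simp only [solveLoop, Nat.cast_zero] at *
    constructor
    · intro _ j hj1 hj2; omega
    · intro _; trivial
  | succ k ih =>
    simp only [solveLoop, PySem.Dict.contains_counter, PySem.Dict.getD_counter]
    have hiM : i ≤ M := by push_cast at hk; omega
    by_cases hc : arr.contains i
    · simp only [hc, not_true, if_false]
      have hipos : 0 < arr.count i := List.count_pos_iff.mpr (by simpa using hc)
      by_cases hlt : num < (arr.count i : Int)
      · simp only [hlt, if_true]
        constructor
        · intro h; exact absurd h (by decide)
        · intro h
          have := (h i le_rfl hiM).2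
          rw [hnum] at hlt
          exact absurd this (by exact_mod_cast not_le.mpr hlt)
      · simp only [hlt, if_false]
        rw [ih (i + 1) (arr.count i : Int) (by norm_num) (by push_cast at hk ⊢; omega)]
        constructor
        · intro h j hj1 hj2
          rcases eq_or_lt_of_le hj1 with rfl | hj
          · exact ⟨hipos, by rw [hnum] at hlt; exact_mod_cast not_lt.mp hlt⟩
          · exact h j (by omega) hj2
        · intro h j hj1 hj2
          exact h j (by omega) hj2
    · have hc' : arr.contains i = false := by simpa using hc
      simp only [hc', Bool.false_eq_true, not_false_eq_true, if_true]
      constructor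
      · intro h; exact absurd h (by decide)
      · intro h
        have h1 := (h i le_rfl hiM).1
        have h2 : i ∈ arr := List.count_pos_iff.mp h1
        simp at hc
        exact absurd h2 hc

theorem solve_yes_iff (n : Int) (arr : List Int) (h0 : 0 < arr.count 0) :
    (solve n arr = "YES" ↔ Chain arr) := by
  have hmem : (0 : Int) ∈ arr := List.count_pos_iff.mp h0
  have hkeys : (0 : Int) ∈ (PySem.Dict.counter arr).keys := by
    rw [PySem.Dict.keys_counter]
    exact (PySem.Set.mem_ofList arr 0).mpr hmem
  unfold solve
  simp only [PySem.Dict.getD_counter]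
  have hne : ((arr.count 0 : Int)) ≠ 0 := by exact_mod_cast h0.ne'
  rw [if_neg hne]
  rcases hmax : PySem.List.max? (PySem.Dict.counter arr).keys (fun k => k) with _ | M
  · have hnil := (PySem.List.max?_eq_none_iff _ _).mp hmax
    rw [hnil] at hkeys
    exact absurd hkeys (List.not_mem_nil)
  · have hMmem : M ∈ arr := by
      have := PySem.List.max?_mem hmax
      rw [PySem.Dict.keys_counter] at this
      exact (PySem.Set.mem_ofList arr M).mp this
    have hMmax : ∀ y ∈ arr, y ≤ M := by
      intro y hy
      exact PySem.List.max?_isMax hmax y (by rw [PySem.Dict.keys_counter]; exact (PySem.Set.mem_ofList arr y).mpr hy)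
    have hM0 : 0 ≤ M := hMmax 0 hmem
    rw [solveLoop_iff arr M M.toNat 1 (arr.count 0 : Int) (by norm_num) (by omega)]
    constructor
    · intro h j hj1 ⟨l, hl, hjl⟩
      exact h j hj1 (le_trans hjl (hMmax l hl))
    · intro h j hj1 hj2
      exact h j hj1 ⟨M, hMmem, hj2⟩

theorem solve_no (n : Int) (arr : List Int) (h0 : arr.count 0 = 0) : solve n arr = "NO" := by
  unfold solve
  simp [PySem.Dict.getD_counter, h0]

theorem sorted_count (arr : List Int) (w : Int) :
    (PySem.List.sorted arr (fun x => x) false).count w = arr.count w :=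
  (PySem.List.sorted_perm arr (fun x => x) false).count_eq w

theorem pos_count (arr : List Int) (w : Int) (hw : 1 ≤ w) :
    ((PySem.List.sorted arr (fun x => x) false).filter (fun x => decide (0 < x))).count w = arr.count w := by
  rw [List.count_filter (by simp; omega), sorted_count]

theorem solve_alt_yes_iff (n : Int) (arr : List Int) (h0 : 0 < arr.count 0) :
    (solve_alt n arr = "YES" ↔ Chain arr) := by
  unfold solve_alt
  have hz : ((PySem.List.sorted arr (fun x => x) false).count 0 : Int) ≠ 0 := by
    rw [sorted_count]; exact_mod_cast h0.ne'
  rw [if_neg hz]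
  have hp : ((PySem.List.sorted arr (fun x => x) false).filter (fun x => decide (0 < x))).Pairwise (· ≤ ·) :=
    List.Pairwise.filter _ (PySem.List.sorted_pairwise arr (fun x => x))
  have hlb : ∀ x ∈ (PySem.List.sorted arr (fun x => x) false).filter (fun x => decide (0 < x)), (1 : Int) ≤ x := by
    intro x hx
    have := (List.mem_filter.mp hx).2
    simp at this; omega
  rw [altLoop_iff _ 1 _ hp hlb]
  have hmemiff : ∀ i : Int, 1 ≤ i →
      ((∃ j ∈ (PySem.List.sorted arr (fun x => x) false).filter (fun x => decide (0 < x)), i ≤ j) ↔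
        (∃ j ∈ arr, i ≤ j)) := by
    intro i hi
    constructor
    · rintro ⟨j, hj, hij⟩
      exact ⟨j, (PySem.List.mem_sorted arr _ false j).mp (List.mem_filter.mp hj).1, hij⟩
    · rintro ⟨j, hj, hij⟩
      refine ⟨j, List.mem_filter.mpr ⟨(PySem.List.mem_sorted arr _ false j).mpr hj, by simp; omega⟩, hij⟩
  unfold Chain
  constructor
  · intro h i hi hex
    obtain ⟨hpos, hbound⟩ := h i hi ((hmemiff i hi).mpr hex)
    rw [pos_count arr i hi] at hpos hbound
    refine ⟨hpos, ?_⟩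
    by_cases hi1 : i = 1
    · subst hi1
      rw [if_pos rfl, sorted_count] at hbound
      exact_mod_cast hbound
    · rw [if_neg hi1, pos_count arr (i - 1) (by omega)] at hbound
      exact_mod_cast hbound
  · intro h i hi hex
    obtain ⟨hpos, hbound⟩ := h i hi ((hmemiff i hi).mp hex)
    rw [pos_count arr i hi]
    refine ⟨hpos, ?_⟩
    by_cases hi1 : i = 1
    · subst hi1
      rw [if_pos rfl, sorted_count]
      exact_mod_cast hbound
    · rw [if_neg hi1, pos_count arr (i - 1) (by omega)]
      exact_mod_cast hbound

theorem solve_alt_no (n : Int) (arr : List Int) (h0 : arr.count 0 = 0) : solve_alt n arr = "NO" := by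
  unfold solve_alt
  rw [if_pos (by rw [sorted_count, h0]; rfl)]

theorem solve_mem (n : Int) (arr : List Int) : solve n arr = "YES" ∨ solve n arr = "NO" := by
  unfold solve
  by_cases h : ((PySem.Dict.counter arr).getD 0 0) = 0
  · rw [if_pos h]; right; rfl
  · rw [if_neg h]
    rcases hm : PySem.List.max? (PySem.Dict.counter arr).keys (fun k => k) with _ | M
    · right; rfl
    · exact solveLoop_mem _ _ _ _

theorem solve_alt_mem (n : Int) (arr : List Int) : solve_alt n arr = "YES" ∨ solve_alt n arr = "NO" := by
  unfold solve_alt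
  by_cases h : ((PySem.List.sorted arr (fun x => x) false).count 0 : Int) = 0
  · rw [if_pos h]; right; rfl
  · rw [if_neg h]
    exact altLoop_mem _ _ _

-- ===== VERDICT (by name: the statement is the Claim_ definition above) =====
theorem solve_spec : Claim_equal_solve := by
  intro n arr _
  unfold Spec_solve
  by_cases h0 : arr.count 0 = 0
  · rw [solve_no n arr h0, solve_alt_no n arr h0]
  · have h0' : 0 < arr.count 0 := Nat.pos_of_ne_zero h0
    have hA := solve_yes_iff n arr h0'
    have hB := solve_alt_yes_iff n arr h0'
    rcases solve_mem n arr with hy | hn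
    · have h2 := hB.mpr (hA.mp hy)
      rw [hy, h2]
    · rcases solve_alt_mem n arr with hy' | hn'
      · have h2 := hA.mpr (hB.mp hy')
        rw [hn] at h2; exact absurd h2 (by decide)
      · rw [hn, hn']
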